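-- pv_equiv track=rewrite | github.com/kramsman/Tools | Work/ai for in multi rooms.py | get_multi_room_data
-- ===== SOURCE A (Python) =====
-- def get_multi_room_data(people):
--     # Count how many rooms each name has
--     name_rooms = {}
--     for name, room in people:
--         name_rooms.setdefault(name, set()).add(room)
--
--     # Find names with more than one unique room
--     multi_room_names = {name for name, rooms in name_rooms.items() if len(rooms) > 1}
--
--     # Filter the original data for those names
--     filtered = [entry for entry in people if entry[0] in multi_room_names]
--
--     # Sort the result by name, then room
--     filtered.sort(key=lambda x: (x[0], x[1]))
--
--     return filtered
-- ===== SOURCE B (Python) =====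
-- def get_multi_room_data(people):
--     # One sort up front, then a single grouped scan over consecutive equal names.
--     s = sorted(people, key=lambda x: (x[0], x[1]))
--     result = []
--     i = 0
--     n = len(s)
--     while i < n:
--         j = i
--         while j < n and s[j][0] == s[i][0]:
--             j += 1
--         group = s[i:j]
--         if len({room for _, room in group}) > 1:
--             result.extend(group)
--         i = j
--     return result
-- ===== Notes on version B (the rewrite author's own statement) =====
-- stated objective: alternative
-- what changed: Replaces the name->room-set dict plus separate filter and final sort with one sort by (name, room) up front followed by a single scan that groups consecutive entries of the same name and emits a group when it spans more than one distinct room.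
import Mathlib
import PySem

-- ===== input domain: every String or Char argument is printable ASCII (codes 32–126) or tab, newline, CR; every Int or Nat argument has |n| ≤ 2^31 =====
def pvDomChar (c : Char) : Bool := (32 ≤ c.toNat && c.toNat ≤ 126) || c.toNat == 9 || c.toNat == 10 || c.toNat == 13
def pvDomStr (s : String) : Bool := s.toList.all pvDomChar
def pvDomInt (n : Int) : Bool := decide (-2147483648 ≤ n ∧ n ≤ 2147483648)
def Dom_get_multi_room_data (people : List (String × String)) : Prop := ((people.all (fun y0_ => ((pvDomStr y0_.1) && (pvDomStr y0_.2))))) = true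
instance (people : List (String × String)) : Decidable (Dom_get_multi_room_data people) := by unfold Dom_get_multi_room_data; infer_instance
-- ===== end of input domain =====

-- B replaces A's dict-of-room-sets + filter + final sort with one sort by (name, room) and a single
-- grouped scan over consecutive equal names (alternative decomposition, same asymptotic cost).

-- ===== PORT A =====
def get_multi_room_data (people : List (String × String)) : List (String × String) :=
  -- name_rooms: for name, room in people: name_rooms.setdefault(name, set()).add(room)
  let name_rooms : PySem.Dict String (PySem.Set String) :=
    people.foldl (fun d p => d.modify p.1 PySem.Set.empty (fun s => PySem.Set.add s p.2))
      PySem.Dict.empty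
  -- multi_room_names = {name for name, rooms in name_rooms.items() if len(rooms) > 1}
  let multi_room_names : PySem.Set String :=
    PySem.Set.ofList ((name_rooms.items.filter (fun kv => decide (kv.2.length > 1))).map (fun kv => kv.1))
  -- filtered = [entry for entry in people if entry[0] in multi_room_names]
  let filtered := people.filter (fun e => PySem.Set.contains multi_room_names e.1)
  -- filtered.sort(key=lambda x: (x[0], x[1]))
  PySem.List.sorted2 filtered (fun x => x.1) (fun x => x.2)

-- ===== PORT B =====
-- the outer while loop of Source B: take the run of consecutive entries sharing the head's name,
-- emit it when it has more than one distinct room, continue on the remainder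
def pvGroupLoop : List (String × String) → List (String × String)
  | [] => []
  | e :: t =>
    let grp := e :: t.takeWhile (fun q => q.1 == e.1)
    let rest := t.dropWhile (fun q => q.1 == e.1)
    (if (PySem.Set.ofList (grp.map (fun q => q.2))).length > 1 then grp else []) ++ pvGroupLoop rest
termination_by s => s.length
decreasing_by
  simp only [List.length_cons]
  exact Nat.lt_succ_of_le (List.length_dropWhile_le _ _)

def get_multi_room_data_alt (people : List (String × String)) : List (String × String) :=
  pvGroupLoop (PySem.List.sorted2 people (fun x => x.1) (fun x => x.2))

-- ===== PRECONDITION & SPEC =====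
def Spec_get_multi_room_data (people : List (String × String)) (out : List (String × String)) : Prop := out = get_multi_room_data_alt people
instance (people : List (String × String)) (out : List (String × String)) : Decidable (Spec_get_multi_room_data people out) := by unfold Spec_get_multi_room_data; infer_instance

-- ===== CLAIM (what is proved, stated in full; the proofs are below) =====
def Claim_equal_get_multi_room_data : Prop := ∀ (people : List (String × String)), Dom_get_multi_room_data people → Spec_get_multi_room_data people (get_multi_room_data people)

-- ===== LEMMAS AND PROOFS =====

-- the (name, room) lexicographic order both programs sort by
def pvLex (a b : String × String) : Prop := a.1 < b.1 ∨ (a.1 = b.1 ∧ a.2 ≤ b.2)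

-- rooms listed for a given name, and the "appears in > 1 distinct rooms" predicate
def pvRooms (xs : List (String × String)) (n : String) : List String :=
  (xs.filter (fun q => q.1 == n)).map (fun q => q.2)

def pvMulti (xs : List (String × String)) (e : String × String) : Bool :=
  decide ((PySem.Set.ofList (pvRooms xs e.1)).length > 1)

theorem pvLex_trans {a b c : String × String} (h1 : pvLex a b) (h2 : pvLex b c) : pvLex a c := by
  unfold pvLex at *
  rcases h1 with h1 | ⟨h1, h1'⟩ <;> rcases h2 with h2 | ⟨h2, h2'⟩
  · exact Or.inl (lt_trans h1 h2)
  · exact Or.inl (h2 ▸ h1)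
  · exact Or.inl (h1 ▸ h2)
  · exact Or.inr ⟨h1.trans h2, le_trans h1' h2'⟩

theorem pvLex_total (a b : String × String) : pvLex a b ∨ pvLex b a := by
  unfold pvLex
  rcases lt_trichotomy a.1 b.1 with h | h | h
  · exact Or.inl (Or.inl h)
  · rcases le_total a.2 b.2 with h2 | h2
    · exact Or.inl (Or.inr ⟨h, h2⟩)
    · exact Or.inr (Or.inr ⟨h.symm, h2⟩)
  · exact Or.inr (Or.inl h)

theorem pvLex_antisymm {a b : String × String} (h1 : pvLex a b) (h2 : pvLex b a) : a = b := by
  unfold pvLex at *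
  rcases h1 with h1 | ⟨h1, h1'⟩ <;> rcases h2 with h2 | ⟨h2, h2'⟩
  · exact absurd h2 (lt_asymm h1)
  · exact absurd h1 (h2 ▸ lt_irrefl _)
  · exact absurd h2 (h1 ▸ lt_irrefl _)
  · exact Prod.ext h1 (le_antisymm h1' h2')

-- the boolean comparison sorted2 uses, versus pvLex
def pvBefore (a b : String × String) : Bool :=
  decide (a.1 < b.1) || (!decide (b.1 < a.1) && decide (a.2 < b.2))

theorem pvBefore_iff (a b : String × String) : pvBefore a b = true ↔ ¬ pvLex b a := by
  unfold pvBefore pvLex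
  simp only [Bool.or_eq_true, Bool.and_eq_true, Bool.not_eq_true', decide_eq_true_eq,
    decide_eq_false_iff_not, not_or, not_and, not_le]
  constructor
  · rintro (h | ⟨h1, h2⟩)
    · exact ⟨lt_asymm h, fun he => absurd (he ▸ h) (lt_irrefl _)⟩
    · exact ⟨h1, fun _ => h2⟩
  · rintro ⟨h1, h2⟩
    rcases lt_trichotomy a.1 b.1 with h | h | h
    · exact Or.inl h
    · exact Or.inr ⟨h1, h2 h.symm⟩
    · exact absurd h h1

theorem pvInsertBy_pairwise (x : String × String) (acc : List (String × String))
    (h : acc.Pairwise pvLex) : (PySem.List.insertBy pvBefore x acc).Pairwise pvLex := by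
  induction acc with
  | nil => simp [PySem.List.insertBy]
  | cons y ys ih =>
    rw [List.pairwise_cons] at h
    obtain ⟨hy, hys⟩ := h
    have hstep : PySem.List.insertBy pvBefore x (y :: ys)
        = if pvBefore x y = true then x :: y :: ys else y :: PySem.List.insertBy pvBefore x ys := rfl
    rw [hstep]
    by_cases hb : pvBefore x y = true
    · have hxy : pvLex x y := (pvLex_total x y).resolve_right ((pvBefore_iff x y).mp hb)
      rw [if_pos hb]
      refine List.Pairwise.cons ?_ (List.Pairwise.cons hy hys)
      intro z hz
      rcases List.mem_cons.mp hz with rfl | hz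
      · exact hxy
      · exact pvLex_trans hxy (hy z hz)
    · have hyx : pvLex y x := by
        by_contra hc
        exact hb ((pvBefore_iff x y).mpr hc)
      rw [if_neg hb]
      refine List.Pairwise.cons ?_ (ih hys)
      intro z hz
      rcases (PySem.List.mem_insertBy pvBefore x z ys).mp hz with rfl | hz
      · exact hyx
      · exact hy z hz

theorem pvSorted2_pairwise (xs : List (String × String)) :
    (PySem.List.sorted2 xs (fun x => x.1) (fun x => x.2) false).Pairwise pvLex := by
  show (xs.foldl (fun acc x => PySem.List.insertBy pvBefore x acc) []).Pairwise pvLex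
  have key : ∀ (l acc : List (String × String)), acc.Pairwise pvLex →
      (l.foldl (fun acc x => PySem.List.insertBy pvBefore x acc) acc).Pairwise pvLex := by
    intro l
    induction l with
    | nil => intro acc h; exact h
    | cons a l ih => intro acc h; exact ih _ (pvInsertBy_pairwise a acc h)
  exact key xs [] List.Pairwise.nil

-- the dict built by A holds, at each name, the set of that name's rooms
theorem pvDict_getD (l : List (String × String)) (d : PySem.Dict String (PySem.Set String)) (c : String) :
    (l.foldl (fun d p => d.modify p.1 PySem.Set.empty (fun s => PySem.Set.add s p.2)) d).getD c PySem.Set.empty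
      = PySem.Set.update (d.getD c PySem.Set.empty) ((l.filter (fun q => q.1 == c)).map (fun q => q.2)) := by
  induction l generalizing d with
  | nil => simp [PySem.Set.update]
  | cons p l ih =>
    simp only [List.foldl_cons]
    rw [ih]
    by_cases hp : p.1 = c
    · have h1 : (d.modify p.1 PySem.Set.empty fun s => PySem.Set.add s p.2).getD c PySem.Set.empty
          = PySem.Set.add (d.getD c PySem.Set.empty) p.2 := by
        subst hp
        exact PySem.Dict.getD_modify_self _ _ _ _
      rw [h1]
      simp [hp, PySem.Set.update_cons]
    · have h1 : (d.modify p.1 PySem.Set.empty fun s => PySem.Set.add s p.2).getD c PySem.Set.empty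
          = d.getD c PySem.Set.empty := PySem.Dict.getD_modify_of_ne _ _ _ (Ne.symm hp)
      rw [h1]
      simp [hp]

-- membership in A's multi_room_names set, characterised by pvMulti
theorem pvMem_multi (people : List (String × String)) (e : String × String) :
    (PySem.Set.contains
      (PySem.Set.ofList (((people.foldl (fun d p => d.modify p.1 PySem.Set.empty (fun s => PySem.Set.add s p.2))
          PySem.Dict.empty).items.filter (fun kv => decide (kv.2.length > 1))).map (fun kv => kv.1)))
      e.1) = pvMulti people e := by
  set D := people.foldl (fun d p => d.modify p.1 PySem.Set.empty (fun s => PySem.Set.add s p.2))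
      PySem.Dict.empty with hD
  have hnd : D.keys.Nodup := by
    rw [hD]
    exact PySem.Dict.nodup_keys_foldl_modify_key people (fun p => p.1) PySem.Set.empty
      (fun d p s => PySem.Set.add s p.2) PySem.Dict.empty PySem.Dict.nodup_keys_empty
  have hget : D.getD e.1 PySem.Set.empty = PySem.Set.ofList (pvRooms people e.1) := by
    rw [hD, pvDict_getD]
    simp [PySem.Dict.getD_empty, pvRooms, PySem.Set.update_nil_left, PySem.Set.empty]
  have hmem : e.1 ∈ ((D.items.filter (fun kv => decide (kv.2.length > 1))).map (fun kv => kv.1))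
      ↔ (PySem.Set.ofList (pvRooms people e.1)).length > 1 := by
    constructor
    · intro h
      rcases List.mem_map.mp h with ⟨kv, hkv, hfst⟩
      obtain ⟨hitems, hlen⟩ := List.mem_filter.mp hkv
      have hv : D.getD kv.1 PySem.Set.empty = kv.2 :=
        PySem.Dict.getD_of_mem_items D (by simpa using hitems) hnd PySem.Set.empty
      rw [hfst, hget] at hv
      rw [hv]
      simpa using hlen
    · intro h
      have hne : D.getD e.1 PySem.Set.empty ≠ PySem.Set.empty := by
        rw [hget]
        intro hnil
        rw [hnil] at h
        simp [PySem.Set.empty] at h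
      obtain ⟨v, hv⟩ : ∃ v, D.get? e.1 = some v := by
        cases hg : D.get? e.1 with
        | none => exact absurd (PySem.Dict.getD_of_get?_eq_none D PySem.Set.empty hg) hne
        | some v => exact ⟨v, rfl⟩
      have hveq : D.getD e.1 PySem.Set.empty = v := PySem.Dict.getD_of_get?_eq_some D PySem.Set.empty hv
      refine List.mem_map.mpr ⟨(e.1, v),
        List.mem_filter.mpr ⟨PySem.Dict.mem_items_of_get?_eq_some D hv, ?_⟩, rfl⟩
      rw [hget] at hveq
      simpa [← hveq] using h
  rw [pvMulti]
  by_cases h : (PySem.Set.ofList (pvRooms people e.1)).length > 1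
  · simp only [h, decide_true]
    exact (PySem.Set.contains_iff _ _).mpr ((PySem.Set.mem_ofList _ _).mpr (hmem.mpr h))
  · simp only [h, decide_false]
    by_contra hc
    simp only [Bool.not_eq_false] at hc
    exact h (hmem.mp ((PySem.Set.mem_ofList _ _).mp ((PySem.Set.contains_iff _ _).mp hc)))

-- A is: sort the pvMulti-filtered input by (name, room)
theorem pvA_eq (people : List (String × String)) :
    get_multi_room_data people
      = PySem.List.sorted2 (people.filter (pvMulti people)) (fun x => x.1) (fun x => x.2) := by
  show PySem.List.sorted2
      (people.filter (fun e => PySem.Set.contains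
        (PySem.Set.ofList (((people.foldl (fun d p => d.modify p.1 PySem.Set.empty (fun s => PySem.Set.add s p.2))
            PySem.Dict.empty).items.filter (fun kv => decide (kv.2.length > 1))).map (fun kv => kv.1)))
        e.1))
      (fun x => x.1) (fun x => x.2)
    = PySem.List.sorted2 (people.filter (pvMulti people)) (fun x => x.1) (fun x => x.2)
  rw [List.filter_congr (fun e _ => pvMem_multi people e)]

-- number of distinct elements is invariant under permutation
theorem pvSetLen_perm {l l' : List String} (h : l.Perm l') :
    (PySem.Set.ofList l).length = (PySem.Set.ofList l').length := by
  have hperm : (PySem.Set.ofList l).Perm (PySem.Set.ofList l') := by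
    refine (List.perm_ext_iff_of_nodup (PySem.Set.nodup_ofList _) (PySem.Set.nodup_ofList _)).mpr ?_
    intro x
    rw [PySem.Set.mem_ofList, PySem.Set.mem_ofList]
    exact h.mem_iff
  exact hperm.length_eq

theorem pvMulti_perm {xs ys : List (String × String)} (h : xs.Perm ys) (e : String × String) :
    pvMulti xs e = pvMulti ys e := by
  unfold pvMulti pvRooms
  rw [pvSetLen_perm ((h.filter _).map _)]

-- everything after the takeWhile run has a different name
theorem pvRest_ne (t : List (String × String)) (n : String) (hp : t.Pairwise pvLex)
    (hge : ∀ q ∈ t, n ≤ q.1) (e : String × String)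
    (he : e ∈ t.dropWhile (fun q => q.1 == n)) : (e.1 == n) = false := by
  cases hrest : t.dropWhile (fun q => q.1 == n) with
  | nil => simp [hrest] at he
  | cons e0 rest' =>
    have h0 : (e0.1 == n) = false := by
      have hh := List.head?_dropWhile_not (fun q => q.1 == n) t
      rw [hrest] at hh
      simpa using hh
    have h0' : e0.1 ≠ n := by simpa using h0
    have h0mem : e0 ∈ t := (List.dropWhile_sublist _).mem (hrest ▸ List.mem_cons_self)
    have hlt0 : n < e0.1 := lt_of_le_of_ne (hge e0 h0mem) (Ne.symm h0')
    have hpd : (t.dropWhile (fun q => q.1 == n)).Pairwise pvLex :=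
      hp.sublist (List.dropWhile_sublist _)
    rw [hrest, List.pairwise_cons] at hpd
    rw [hrest] at he
    rcases List.mem_cons.mp he with rfl | he
    · exact h0
    · have hle : e0.1 ≤ e.1 := by
        rcases hpd.1 e he with h' | ⟨h', -⟩
        · exact le_of_lt h'
        · exact le_of_eq h'
      have : n < e.1 := lt_of_lt_of_le hlt0 hle
      simpa using this.ne'

-- the grouped scan equals filtering the sorted list by pvMulti
theorem pvGroupLoop_eq : ∀ (s : List (String × String)), s.Pairwise pvLex →
    pvGroupLoop s = s.filter (pvMulti s) := by
  intro s
  induction s using pvGroupLoop.induct with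
  | case1 => intro _; simp [pvGroupLoop]
  | case2 e t rst ih =>
    intro hp
    rw [List.pairwise_cons] at hp
    obtain ⟨hhead, hpt⟩ := hp
    set g := t.takeWhile (fun q => q.1 == e.1) with hg
    have hr : rst = t.dropWhile (fun q => q.1 == e.1) := rfl
    set rest := t.dropWhile (fun q => q.1 == e.1) with hr2
    have hsplit : g ++ rest = t := List.takeWhile_append_dropWhile
    have hge : ∀ q ∈ t, e.1 ≤ q.1 := by
      intro q hq
      rcases hhead q hq with h' | ⟨h', -⟩
      · exact le_of_lt h'
      · exact le_of_eq h'
    have hgname : ∀ q ∈ e :: g, (q.1 == e.1) = true := by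
      intro q hq
      rcases List.mem_cons.mp hq with rfl | hq
      · simp
      · refine List.mem_takeWhile_imp (p := fun q => q.1 == e.1) (l := t) ?_
        rw [← hg]
        exact hq
    have hrestname : ∀ q ∈ rest, (q.1 == e.1) = false := fun q hq => pvRest_ne t e.1 hpt hge q hq
    have hfiltsplit : ∀ (p : (String × String) → Bool),
        (e :: t).filter p = (e :: g).filter p ++ rest.filter p := by
      intro p
      have hct : e :: t = (e :: g) ++ rest := by rw [List.cons_append, hsplit]
      rw [hct, List.filter_append]
    -- the name-filter of the whole list is exactly the head group
    have hnamefilt : (e :: t).filter (fun q => q.1 == e.1) = e :: g := by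
      rw [hfiltsplit]
      rw [List.filter_eq_self.mpr (hgname), List.filter_eq_nil_iff.mpr ?_, List.append_nil]
      intro q hq
      simp [hrestname q hq]
    have hrooms : pvRooms (e :: t) e.1 = (e :: g).map (fun q => q.2) := by
      unfold pvRooms
      rw [hnamefilt]
    -- pvMulti over the whole list, on group members, is the group condition
    have hPg : ∀ q ∈ e :: g, pvMulti (e :: t) q
        = decide ((PySem.Set.ofList ((e :: g).map (fun q => q.2))).length > 1) := by
      intro q hq
      have hq1 : q.1 = e.1 := by simpa using hgname q hq
      unfold pvMulti
      rw [hq1, hrooms]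
    -- pvMulti over the whole list, on rest members, is pvMulti over rest
    have hPrest : ∀ q ∈ rest, pvMulti (e :: t) q = pvMulti rest q := by
      intro q hq
      have hqne : (q.1 == e.1) = false := hrestname q hq
      have hqne' : q.1 ≠ e.1 := by simpa using hqne
      unfold pvMulti
      congr 1
      unfold pvRooms
      rw [hfiltsplit]
      rw [List.filter_eq_nil_iff.mpr ?_, List.nil_append]
      intro x hx
      have hx1 : x.1 = e.1 := by simpa using hgname x hx
      simp [hx1, Ne.symm hqne']
    have hloop : pvGroupLoop (e :: t)
        = (if (PySem.Set.ofList ((e :: g).map (fun q => q.2))).length > 1 then e :: g else [])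
          ++ pvGroupLoop rest := by
      rw [pvGroupLoop]
    rw [hloop, hfiltsplit (pvMulti (e :: t))]
    have hrestpart : rest.filter (pvMulti (e :: t)) = rest.filter (pvMulti rest) :=
      List.filter_congr (fun q hq => hPrest q hq)
    have hrestpw : rest.Pairwise pvLex := hpt.sublist (List.dropWhile_sublist _)
    have hihr : pvGroupLoop rest = rest.filter (pvMulti rest) := by
      rw [hr2, ← hr] at *
      exact ih hrestpw
    rw [hrestpart, ← hihr]
    congr 1
    by_cases hc : (PySem.Set.ofList ((e :: g).map (fun q => q.2))).length > 1
    · rw [if_pos hc, List.filter_eq_self.mpr]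
      intro q hq
      rw [hPg q hq]
      simpa using hc
    · rw [if_neg hc, List.filter_eq_nil_iff.mpr]
      intro q hq
      rw [hPg q hq]
      simpa using hc

-- ===== VERDICT (by name: the statement is the Claim_ definition above) =====
theorem get_multi_room_data_spec : Claim_equal_get_multi_room_data := by
  unfold Claim_equal_get_multi_room_data
  intro people _
  unfold Spec_get_multi_room_data get_multi_room_data_alt
  rw [pvA_eq]
  have hperm : (PySem.List.sorted2 people (fun x => x.1) (fun x => x.2) false).Perm people :=
    PySem.List.sorted2_perm people _ _ _
  rw [pvGroupLoop_eq _ (pvSorted2_pairwise people)]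
  rw [List.filter_congr (fun e _ => pvMulti_perm hperm e)]
  refine List.eq_of_perm_of_sorted (fun a b _ _ h1 h2 => pvLex_antisymm h1 h2)
    (pvSorted2_pairwise _)
    (List.Pairwise.sublist List.filter_sublist (pvSorted2_pairwise people)) ?_
  exact (PySem.List.sorted2_perm _ _ _ _).trans ((hperm.filter _).symm)
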